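-- pv_equiv track=rewrite | github.com/JTexpo/Sudoku_DFS | sudoku_dfs/possible_moves.py | possible_box_moves
-- ===== SOURCE A (Python) =====
-- from typing import List
--
-- def possible_box_moves(
--     board: List[List[int]], box_row: int, box_column: int
-- ) -> List[int]:
--     """A function to find all the valid moves that exists in a box
--
--     Args:
--         board (List[List[int]]): the sudoku board
--         box_row (int): a number 0 -> 2, where the box is located across
--         box_column (int): a number 0 -> 2, where the box is located tall
--
--     Returns:
--         List[int]: a list of avaible numbers
--     """
--     all_moves = list(range(1, 10))
--     for row in range(box_row * 3, box_row * 3 + 3):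
--         for column in range(box_column * 3, box_column * 3 + 3):
--             if board[row][column] in all_moves:
--                 all_moves.remove(board[row][column])
--     return all_moves
-- ===== SOURCE B (Python) =====
-- def possible_box_moves(board, box_row, box_column):
--     def used(number):
--         return any(
--             board[row][column] == number
--             for row in range(box_row * 3, box_row * 3 + 3)
--             for column in range(box_column * 3, box_column * 3 + 3)
--         )
--     return [number for number in range(1, 10) if not used(number)]
-- ===== Notes on version B (the rewrite author's own statement) =====
-- stated objective: alternative
-- what changed: Inverts the iteration: instead of A's mutate-while-scanning loop over the box cells (start with [1..9] and remove each value found), B iterates over the candidate numbers 1..9 and keeps each one for which a nested any-scan over the box finds no equal cell.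
import Mathlib
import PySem

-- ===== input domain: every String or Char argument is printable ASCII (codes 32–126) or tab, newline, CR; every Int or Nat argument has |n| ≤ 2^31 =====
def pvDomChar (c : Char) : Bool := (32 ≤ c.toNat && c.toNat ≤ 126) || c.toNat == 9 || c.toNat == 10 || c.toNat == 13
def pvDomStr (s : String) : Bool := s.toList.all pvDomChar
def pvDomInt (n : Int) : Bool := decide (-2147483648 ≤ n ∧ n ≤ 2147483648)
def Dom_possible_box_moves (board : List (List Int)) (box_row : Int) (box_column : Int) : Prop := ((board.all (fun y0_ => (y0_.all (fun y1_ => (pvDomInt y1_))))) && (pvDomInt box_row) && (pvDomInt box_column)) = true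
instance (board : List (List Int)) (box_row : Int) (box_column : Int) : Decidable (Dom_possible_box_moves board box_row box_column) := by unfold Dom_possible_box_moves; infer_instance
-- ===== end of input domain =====

-- B inverts the iteration: candidates 1..9 are each tested by an any-scan over the
-- box cells, instead of A's mutate-while-scanning removal from [1..9]; same purpose, alternative shape.

-- ===== PORT A =====
-- for row … for column …: if board[row][column] in all_moves: all_moves.remove(…)
def possible_box_moves (board : List (List Int)) (box_row : Int) (box_column : Int) : List Int :=
  let all_moves := PySem.List.pyRange 1 10 1
  (PySem.List.pyRange (box_row * 3) (box_row * 3 + 3) 1).foldl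
    (fun all_moves row =>
      (PySem.List.pyRange (box_column * 3) (box_column * 3 + 3) 1).foldl
        (fun all_moves column =>
          let v := PySem.List.pyGetD (PySem.List.pyGetD board row []) column 0
          if v ∈ all_moves then (PySem.List.remove? all_moves v).getD all_moves else all_moves)
        all_moves)
    all_moves

-- ===== PORT B =====
-- used(number) = any(board[row][column] == number for row … for column …)
def pv_used (board : List (List Int)) (box_row : Int) (box_column : Int) (number : Int) : Bool :=
  (PySem.List.pyRange (box_row * 3) (box_row * 3 + 3) 1).any fun row =>
    (PySem.List.pyRange (box_column * 3) (box_column * 3 + 3) 1).any fun column =>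
      PySem.List.pyGetD (PySem.List.pyGetD board row []) column 0 == number

def possible_box_moves_alt (board : List (List Int)) (box_row : Int) (box_column : Int) : List Int :=
  (PySem.List.pyRange 1 10 1).filter fun number => !pv_used board box_row box_column number

-- ===== PRECONDITION & SPEC =====
-- Pre_ excludes exactly the inputs on which A raises IndexError:
-- some accessed cell index is out of range under Python indexing.
def Pre_possible_box_moves (board : List (List Int)) (box_row : Int) (box_column : Int) : Prop :=
  ∀ row ∈ PySem.List.pyRange (box_row * 3) (box_row * 3 + 3) 1,
    PySem.Raise.InRange board.length row ∧
    ∀ column ∈ PySem.List.pyRange (box_column * 3) (box_column * 3 + 3) 1,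
      PySem.Raise.InRange (PySem.List.pyGetD board row []).length column
instance (board : List (List Int)) (box_row : Int) (box_column : Int) : Decidable (Pre_possible_box_moves board box_row box_column) := by unfold Pre_possible_box_moves; infer_instance

def pvWitness_possible_box_moves : List (List Int) × Int × Int :=
  ([[1, 2, 3], [4, 5, 6], [7, 8, 9]], 0, 0)

def Spec_possible_box_moves (board : List (List Int)) (box_row : Int) (box_column : Int) (out : List Int) : Prop := out = possible_box_moves_alt board box_row box_column
instance (board : List (List Int)) (box_row : Int) (box_column : Int) (out : List Int) : Decidable (Spec_possible_box_moves board box_row box_column out) := by unfold Spec_possible_box_moves; infer_instance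

-- ===== CLAIM (what is proved, stated in full; the proofs are below) =====
def Claim_equal_possible_box_moves : Prop := ∀ (board : List (List Int)) (box_row : Int) (box_column : Int), Dom_possible_box_moves board box_row box_column → Pre_possible_box_moves board box_row box_column → Spec_possible_box_moves board box_row box_column (possible_box_moves board box_row box_column)

-- ===== LEMMAS AND PROOFS =====

-- A's remove step, under Nodup, is a filter.
theorem pv_step_eq_filter (ms : List Int) (v : Int) (h : ms.Nodup) :
    (if v ∈ ms then (PySem.List.remove? ms v).getD ms else ms)
      = ms.filter (fun n => n != v) := by
  by_cases hv : v ∈ ms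
  · rw [if_pos hv, PySem.List.remove?_eq_some_erase ms v hv, Option.getD_some,
      List.Nodup.erase_eq_filter h v]
  · rw [if_neg hv]
    symm
    apply List.filter_eq_self.mpr
    intro a ha
    simp only [bne_iff_ne, ne_eq]
    rintro rfl; exact hv ha

-- A's removal fold over any list of seen values = filter by non-membership.
theorem pv_fold_eq_filter (vs : List Int) :
    ∀ ms : List Int, ms.Nodup →
      vs.foldl (fun ms v => if v ∈ ms then (PySem.List.remove? ms v).getD ms else ms) ms
        = ms.filter (fun n => !(vs.contains n)) := by
  induction vs with
  | nil => intro ms _; simp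
  | cons v tl ih =>
      intro ms h
      rw [List.foldl_cons, pv_step_eq_filter ms v h,
        ih _ (List.Nodup.filter _ h), List.filter_filter]
      apply List.filter_congr
      intro a _
      simp only [List.contains_cons, Bool.not_or, Bool.and_comm, bne]

-- membership in the flattened cell list = B's nested any-scan
theorem pv_contains_eq_used (board : List (List Int)) (box_row box_column n : Int) :
    ((PySem.List.pyRange (box_row * 3) (box_row * 3 + 3) 1).flatMap
      (fun row =>
        (PySem.List.pyRange (box_column * 3) (box_column * 3 + 3) 1).map
          (fun column => PySem.List.pyGetD (PySem.List.pyGetD board row []) column 0))).contains n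
      = pv_used board box_row box_column n := by
  rw [Bool.eq_iff_iff]
  simp only [List.contains_iff_mem, List.mem_flatMap, List.mem_map, pv_used,
    List.any_eq_true, beq_iff_eq]

-- ===== VERDICT (by name: the statement is the Claim_ definition above) =====
theorem possible_box_moves_spec : Claim_equal_possible_box_moves := by
  intro board box_row box_column _ _
  unfold Spec_possible_box_moves possible_box_moves possible_box_moves_alt
  simp only [← pv_contains_eq_used board box_row box_column]
  rw [← pv_fold_eq_filter
        ((PySem.List.pyRange (box_row * 3) (box_row * 3 + 3) 1).flatMap
          (fun row =>
            (PySem.List.pyRange (box_column * 3) (box_column * 3 + 3) 1).map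
              (fun column => PySem.List.pyGetD (PySem.List.pyGetD board row []) column 0)))
        (PySem.List.pyRange 1 10 1) (PySem.List.nodup_pyRange_one 1 10),
      List.foldl_flatMap]
  simp only [List.foldl_map]
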